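-- pv_equiv track=rewrite | github.com/up21001/blog | scripts/expand_short_posts.py | fm_to_lines
-- ===== SOURCE A (Python) =====
-- def fm_to_lines(fm: dict[str, str]) -> list[str]:
--     order = ["title", "date", "lastmod", "description", "slug", "categories", "tags", "draft"]
--     lines = ["---"]
--     seen: set[str] = set()
--     for k in order:
--         if k in fm:
--             lines.append(f"{k}: {fm[k]}")
--             seen.add(k)
--     for k, v in sorted(fm.items()):
--         if k not in seen:
--             lines.append(f"{k}: {v}")
--     lines.append("---")
--     return lines
-- ===== SOURCE B (Python) =====
-- def fm_to_lines(fm: dict[str, str]) -> list[str]: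
--     order = ["title", "date", "lastmod", "description", "slug", "categories", "tags", "draft"]
--     rank = {k: i for i, k in enumerate(order)}
--     body = [f"{k}: {v}"
--             for k, v in sorted(fm.items(), key=lambda kv: (rank.get(kv[0], len(order)), kv[0]))]
--     return ["---"] + body + ["---"]
-- ===== Notes on version B (the rewrite author's own statement) =====
-- stated objective: alternative
-- what changed: Replaces A's two output loops with a seen-set (fixed-order pass over `order`, then an alphabetical pass over the rest) by a single stable sort of fm.items() under the composite key (rank-in-order, key), which produces the identical line order in one pass.
import Mathlib
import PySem

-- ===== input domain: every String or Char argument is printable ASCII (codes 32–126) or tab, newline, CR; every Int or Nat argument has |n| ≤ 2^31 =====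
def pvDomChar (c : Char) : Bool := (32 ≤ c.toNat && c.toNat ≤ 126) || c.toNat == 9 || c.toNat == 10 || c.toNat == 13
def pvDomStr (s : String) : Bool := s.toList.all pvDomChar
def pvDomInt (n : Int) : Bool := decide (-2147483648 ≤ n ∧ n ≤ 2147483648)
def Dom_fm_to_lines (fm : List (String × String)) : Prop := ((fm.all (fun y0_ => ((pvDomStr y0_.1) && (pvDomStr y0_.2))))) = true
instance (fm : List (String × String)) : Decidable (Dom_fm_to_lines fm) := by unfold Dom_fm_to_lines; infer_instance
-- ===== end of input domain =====

-- B replaces A's two output loops and seen-set with a single stable sort of the items under the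
-- composite key (rank-in-order, key); objective: alternative (same ordering produced by one sort pass).

-- ===== PORT A =====
def fm_to_lines (fm : List (String × String)) : List String :=
  let order : List String := ["title", "date", "lastmod", "description", "slug", "categories", "tags", "draft"]
  let d : PySem.Dict String String := PySem.Dict.mk fm
  -- first loop: for k in order: if k in fm: lines.append(f"{k}: {fm[k]}"); seen.add(k)
  -- (the `.getD ""` default is unreachable: it sits under the `d.contains k` guard, like Python's fm[k])
  let st := order.foldl
    (fun (p : List String × PySem.Set String) k =>
      if d.contains k then (p.1 ++ [k ++ ": " ++ ((d.get? k).getD "")], PySem.Set.add p.2 k) else p)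
    (["---"], PySem.Set.ofList [])
  -- second loop: for k, v in sorted(fm.items()): if k not in seen: lines.append(f"{k}: {v}")
  let lines := (PySem.List.sorted2 d.items (fun kv => kv.1) (fun kv => kv.2)).foldl
    (fun ls kv => if !(PySem.Set.contains st.2 kv.1) then ls ++ [kv.1 ++ ": " ++ kv.2] else ls) st.1
  lines ++ ["---"]

-- ===== PORT B =====
def fm_to_lines_alt (fm : List (String × String)) : List String :=
  let order : List String := ["title", "date", "lastmod", "description", "slug", "categories", "tags", "draft"]
  -- rank = {k: i for i, k in enumerate(order)}
  let rank : PySem.Dict String Int :=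
    (PySem.List.enumerate order 0).foldl (fun d p => d.insert p.2 (p.1 : Int)) PySem.Dict.empty
  -- body = [f"{k}: {v}" for k, v in sorted(fm.items(), key=lambda kv: (rank.get(kv[0], len(order)), kv[0]))]
  let body := (PySem.List.sorted2 fm
      (fun kv => rank.getD kv.1 ((order.length : Int))) (fun kv => kv.1)).map
    (fun kv => kv.1 ++ ": " ++ kv.2)
  ["---"] ++ body ++ ["---"]

-- ===== PRECONDITION & SPEC =====
-- Pre_ excludes association lists with duplicate keys: A's parameter is a Python dict, whose
-- association-list image always has pairwise-distinct keys, so no dict input is excluded.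
def Pre_fm_to_lines (fm : List (String × String)) : Prop := (fm.map Prod.fst).Nodup
instance (fm : List (String × String)) : Decidable (Pre_fm_to_lines fm) := by unfold Pre_fm_to_lines; infer_instance
def pvWitness_fm_to_lines : (List (String × String)) := [("title", "Hello"), ("author", "me")]
def Spec_fm_to_lines (fm : List (String × String)) (out : List String) : Prop := out = fm_to_lines_alt fm
instance (fm : List (String × String)) (out : List String) : Decidable (Spec_fm_to_lines fm out) := by unfold Spec_fm_to_lines; infer_instance

-- ===== CLAIM (what is proved, stated in full; the proofs are below) =====
def Claim_equal_fm_to_lines : Prop := ∀ (fm : List (String × String)), Dom_fm_to_lines fm → Pre_fm_to_lines fm → Spec_fm_to_lines fm (fm_to_lines fm)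

-- ===== LEMMAS AND PROOFS =====
def pvORD : List String := ["title", "date", "lastmod", "description", "slug", "categories", "tags", "draft"]
def pvFmt (kv : String × String) : String := kv.1 ++ ": " ++ kv.2
def pvRK : PySem.Dict String Int :=
  PySem.Dict.mk [("title", 0), ("date", 1), ("lastmod", 2), ("description", 3),
                 ("slug", 4), ("categories", 5), ("tags", 6), ("draft", 7)]
def pvRank (k : String) : Int := pvRK.getD k 8
def pvKnown (fm : List (String × String)) : List (String × String) :=
  pvORD.filterMap (fun k => ((PySem.Dict.mk fm).get? k).map (fun v => (k, v)))
def pvUnk (fm : List (String × String)) : List (String × String) :=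
  (PySem.List.sorted2 fm (fun kv => kv.1) (fun kv => kv.2)).filter (fun kv => !decide (kv.1 ∈ pvORD))

theorem pvRank_not_mem (k : String) (h : k ∉ pvORD) : pvRank k = 8 := by
  simp only [pvORD, List.mem_cons, List.not_mem_nil, or_false, not_or] at h
  obtain ⟨h1, h2, h3, h4, h5, h6, h7, h8⟩ := h
  simp only [pvRank, pvRK, PySem.Dict.getD_eq_get?_getD, PySem.Dict.get?_mk_cons]
  rw [show (("title" == k)) = false from beq_eq_false_iff_ne.mpr (Ne.symm h1)]
  rw [show (("date" == k)) = false from beq_eq_false_iff_ne.mpr (Ne.symm h2)]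
  rw [show (("lastmod" == k)) = false from beq_eq_false_iff_ne.mpr (Ne.symm h3)]
  rw [show (("description" == k)) = false from beq_eq_false_iff_ne.mpr (Ne.symm h4)]
  rw [show (("slug" == k)) = false from beq_eq_false_iff_ne.mpr (Ne.symm h5)]
  rw [show (("categories" == k)) = false from beq_eq_false_iff_ne.mpr (Ne.symm h6)]
  rw [show (("tags" == k)) = false from beq_eq_false_iff_ne.mpr (Ne.symm h7)]
  rw [show (("draft" == k)) = false from beq_eq_false_iff_ne.mpr (Ne.symm h8)]
  rfl

theorem pvLoop1 (d : PySem.Dict String String) (ks : List String) (ls : List String) (s : PySem.Set String) :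
    ks.foldl (fun (p : List String × PySem.Set String) k =>
        if d.contains k then (p.1 ++ [k ++ ": " ++ ((d.get? k).getD "")], PySem.Set.add p.2 k) else p) (ls, s)
    = (ls ++ (ks.filterMap (fun k => (d.get? k).map (fun v => (k, v)))).map pvFmt,
       PySem.Set.update s (ks.filter (fun k => d.contains k))) := by
  induction ks generalizing ls s with
  | nil => simp [PySem.Set.update]
  | cons k t ih =>
    simp only [List.foldl_cons, List.filter_cons, List.filterMap_cons]
    by_cases hc : d.contains k = true
    · have hs : (d.get? k).isSome = true := by rw [← PySem.Dict.contains_eq_isSome_get?]; exact hc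
      obtain ⟨v, hv⟩ := Option.isSome_iff_exists.mp hs
      rw [if_pos hc, ih]
      simp [hv, hc, pvFmt, PySem.Set.update_cons]
    · have hn : d.get? k = none := by
        cases hg : d.get? k with
        | none => rfl
        | some v => exact absurd (by rw [PySem.Dict.contains_eq_isSome_get?, hg]; rfl) hc
      rw [if_neg hc, ih]
      simp [hn, hc]

theorem pvSorted2_lex {α κ₁ κ₂ : Type} [LinearOrder κ₁] [LinearOrder κ₂] (xs : List α) (k1 : α → κ₁) (k2 : α → κ₂) :
    PySem.List.sorted2 xs k1 k2 = PySem.List.sorted xs (fun x => (toLex (k1 x, k2 x) : κ₁ ×ₗ κ₂)) := by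
  simp only [PySem.List.sorted2, PySem.List.sorted, Bool.false_eq_true, if_false]
  have h : (fun a b => decide (k1 a < k1 b) || (!decide (k1 b < k1 a) && decide (k2 a < k2 b)))
      = (fun a b => decide ((toLex (k1 a, k2 a) : κ₁ ×ₗ κ₂) < toLex (k1 b, k2 b))) := by
    funext a b
    rcases lt_trichotomy (k1 a) (k1 b) with h | h | h
    · simp [h, Prod.Lex.lt_iff]
    · simp [h, Prod.Lex.lt_iff]
    · simp [Prod.Lex.lt_iff, not_lt_of_gt h, h.ne']
      exact fun hle => absurd hle (not_le.mpr h)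
  rw [h]

theorem pvA_eq (fm : List (String × String)) :
    fm_to_lines fm = ["---"] ++ ((pvKnown fm).map pvFmt ++ (pvUnk fm).map pvFmt) ++ ["---"] := by
  simp only [fm_to_lines]
  rw [pvLoop1]
  rw [PySem.List.foldl_append_if]
  dsimp only
  have hseen : ∀ kv ∈ PySem.List.sorted2 fm (fun kv : String × String => kv.1) (fun kv => kv.2),
      (!((PySem.Set.ofList ([] : List String)).update
          (List.filter (fun k => (PySem.Dict.mk fm).contains k)
            ["title", "date", "lastmod", "description", "slug", "categories", "tags", "draft"])).contains kv.1)
        = (!decide (kv.1 ∈ pvORD)) := by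
    intro kv hkv
    have hmem : kv ∈ fm := (PySem.List.sorted2_perm fm _ _ _).mem_iff.mp hkv
    have hcont : (PySem.Dict.mk fm).contains kv.1 = true := by
      rw [PySem.Dict.contains_mk]; exact List.any_eq_true.mpr ⟨kv, hmem, by simp⟩
    simp only [PySem.Set.ofList_nil, PySem.Set.update_nil_left]
    congr 1
    by_cases hm : kv.1 ∈ pvORD
    · simp only [hm, decide_true]
      rw [PySem.Set.contains_iff]
      rw [PySem.Set.mem_ofList]
      exact List.mem_filter.mpr ⟨(by simpa [pvORD] using hm), hcont⟩
    · simp only [hm, decide_false]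
      rw [Bool.eq_false_iff]
      intro hcv
      exact hm (by simpa [pvORD] using (List.mem_filter.mp ((PySem.Set.mem_ofList _ _).mp ((PySem.Set.contains_iff _ _).mp hcv))).1)
  rw [List.filter_congr hseen]
  rw [show (fun kv : String × String => kv.1 ++ ": " ++ kv.2) = pvFmt from rfl]
  simp only [pvKnown, pvUnk, pvORD]
  simp [List.append_assoc]

theorem pvB_eq (fm : List (String × String)) :
    fm_to_lines_alt fm
      = ["---"] ++ (PySem.List.sorted2 fm (fun kv => pvRank kv.1) (fun kv => kv.1)).map pvFmt ++ ["---"] := by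
  rfl

theorem pvMain (fm : List (String × String)) (h : Pre_fm_to_lines fm) :
    PySem.List.sorted2 fm (fun kv => pvRank kv.1) (fun kv => kv.1) = pvKnown fm ++ pvUnk fm := by
  have hnd : (fm.map Prod.fst).Nodup := h
  have hndfm : fm.Nodup := List.Nodup.of_map _ hnd
  have hSperm : (PySem.List.sorted2 fm (fun kv : String × String => kv.1) (fun kv => kv.2)).Perm fm :=
    PySem.List.sorted2_perm fm _ _ _
  have hSle : (PySem.List.sorted2 fm (fun kv : String × String => kv.1) (fun kv => kv.2)).Pairwise
      (fun a b => a.1 ≤ b.1) := by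
    rw [pvSorted2_lex]
    refine (PySem.List.sorted_pairwise fm _).imp ?_
    intro a b hab
    rcases Prod.Lex.le_iff.mp hab with hlt | ⟨heq, _⟩
    · exact le_of_lt hlt
    · exact le_of_eq heq
  have hSne : (PySem.List.sorted2 fm (fun kv : String × String => kv.1) (fun kv => kv.2)).Pairwise
      (fun a b => a.1 ≠ b.1) := by
    have hmn : ((PySem.List.sorted2 fm (fun kv : String × String => kv.1) (fun kv => kv.2)).map Prod.fst).Nodup :=
      ((hSperm.map Prod.fst).nodup_iff).mpr hnd
    exact List.pairwise_map.mp hmn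
  have hSlt : (PySem.List.sorted2 fm (fun kv : String × String => kv.1) (fun kv => kv.2)).Pairwise
      (fun a b => a.1 < b.1) :=
    (hSle.and hSne).imp (fun hab => lt_of_le_of_ne hab.1 hab.2)
  have hUnkP : (pvUnk fm).Pairwise
      (fun a b => (toLex (pvRank a.1, a.1) : Int ×ₗ String) < toLex (pvRank b.1, b.1)) := by
    refine List.Pairwise.imp_of_mem ?_ (hSlt.filter (fun kv => !decide (kv.1 ∈ pvORD)))
    intro a b ha hb hab
    have hna : a.1 ∉ pvORD := by simpa using (List.mem_filter.mp ha).2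
    have hnb : b.1 ∉ pvORD := by simpa using (List.mem_filter.mp hb).2
    exact Prod.Lex.lt_iff.mpr (Or.inr ⟨by simp [pvRank_not_mem _ hna, pvRank_not_mem _ hnb], hab⟩)
  have hKnownP : (pvKnown fm).Pairwise
      (fun a b => (toLex (pvRank a.1, a.1) : Int ×ₗ String) < toLex (pvRank b.1, b.1)) := by
    refine List.pairwise_filterMap.mpr ?_
    have hord : pvORD.Pairwise (fun a b => pvRank a < pvRank b) := by decide
    refine hord.imp ?_
    intro a b hab x hx y hy
    obtain ⟨va, hva, rfl⟩ := Option.map_eq_some_iff.mp hx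
    obtain ⟨vb, hvb, rfl⟩ := Option.map_eq_some_iff.mp hy
    exact Prod.Lex.lt_iff.mpr (Or.inl hab)
  have hcross : ∀ a ∈ pvKnown fm, ∀ b ∈ pvUnk fm,
      (toLex (pvRank a.1, a.1) : Int ×ₗ String) < toLex (pvRank b.1, b.1) := by
    intro a ha b hb
    obtain ⟨k, hk, hg⟩ := List.mem_filterMap.mp ha
    obtain ⟨va, hva, rfl⟩ := Option.map_eq_some_iff.mp hg
    have h8 : pvRank b.1 = 8 := pvRank_not_mem _ (by simpa using (List.mem_filter.mp hb).2)
    have hlt : pvRank k < 8 := by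
      have hall : ∀ x ∈ pvORD, pvRank x < 8 := by intro x hx; fin_cases hx <;> decide
      exact hall k hk
    exact Prod.Lex.lt_iff.mpr (Or.inl (by rw [h8]; exact hlt))
  have hpermU : (pvUnk fm).Perm (fm.filter (fun kv => !decide (kv.1 ∈ pvORD))) :=
    hSperm.filter _
  have hpermK : (pvKnown fm).Perm (fm.filter (fun kv => decide (kv.1 ∈ pvORD))) := by
    have ndK : (pvKnown fm).Nodup :=
      hKnownP.imp (fun hab => fun he => absurd hab (he ▸ lt_irrefl _))
    have ndF : (fm.filter (fun kv => decide (kv.1 ∈ pvORD))).Nodup := hndfm.filter _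
    rw [List.perm_ext_iff_of_nodup ndK ndF]
    intro kv
    have hkeys : (PySem.Dict.mk fm).keys.Nodup := by rw [PySem.Dict.keys_mk]; exact hnd
    constructor
    · intro hkv
      obtain ⟨k, hk, hg⟩ := List.mem_filterMap.mp hkv
      obtain ⟨v, hv, rfl⟩ := Option.map_eq_some_iff.mp hg
      refine List.mem_filter.mpr ⟨?_, by simpa using hk⟩
      exact (PySem.Dict.get?_eq_some_iff_mem_items _ _ _ hkeys).mp hv
    · intro hkv
      obtain ⟨hmem, hin⟩ := List.mem_filter.mp hkv
      refine List.mem_filterMap.mpr ⟨kv.1, by simpa using hin, ?_⟩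
      rw [(PySem.Dict.get?_eq_some_iff_mem_items _ _ _ hkeys).mpr hmem]
      rfl
  have hperm : (pvKnown fm ++ pvUnk fm).Perm fm :=
    (hpermK.append hpermU).trans (List.filter_append_perm _ fm)
  rw [pvSorted2_lex]
  exact PySem.List.sorted_eq_of_perm_of_pairwise_lt _ _ _ hperm
    (List.pairwise_append.mpr ⟨hKnownP, hUnkP, hcross⟩)

-- ===== VERDICT (by name: the statement is the Claim_ definition above) =====
theorem fm_to_lines_spec : Claim_equal_fm_to_lines := by
  intro fm _hd hpre
  show fm_to_lines fm = fm_to_lines_alt fm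
  rw [pvA_eq fm, pvB_eq fm, pvMain fm hpre, List.map_append]
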